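-- pv_equiv track=rewrite | github.com/Pororo-Study/Programmers-High-Kit | PCCP-모의고사/1회/[PCCP 모의고사 1] 1번_차하린.py | solution
-- ===== SOURCE A (Python) =====
-- from collections import defaultdict
--
-- def solution(input_string):
--     alpha = defaultdict(int)
--     ans = set()
--     answer = ''
--
--     for i in range(len(input_string)):
--         if alpha[input_string[i]]:
--             if input_string[i] != input_string[i-1]:
--                 ans.add(input_string[i])
--         alpha[input_string[i]] += 1
--
--     ans = sorted(ans)
--     answer = ''.join(ans)
--
--     if answer == '':
--         answer += "N"
--
--     return answer
-- ===== SOURCE B (Python) =====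
-- def solution(input_string):
--     # pass 1: collapse the string into its sequence of run characters
--     runs = []
--     prev = None
--     for ch in input_string:
--         if ch != prev:
--             runs.append(ch)
--             prev = ch
--     # pass 2: a run character already seen started an earlier run -> repeated
--     seen = set()
--     repeated = set()
--     for ch in runs:
--         if ch in seen:
--             repeated.add(ch)
--         else:
--             seen.add(ch)
--     result = ''.join(sorted(repeated))
--     return result if result else "N"
-- ===== Notes on version B (the rewrite author's own statement) =====
-- stated objective: alternative
-- what changed: B replaces A's single index-loop with a per-character count dict and an s[i-1] lookback by two explicit stages: first collapse the string into its list of maximal-run characters, then scan that run list with a seen-set, collecting characters that start a second run. (constant-factor: B does no dict update per character, only a prev-char comparison).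
import Mathlib
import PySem

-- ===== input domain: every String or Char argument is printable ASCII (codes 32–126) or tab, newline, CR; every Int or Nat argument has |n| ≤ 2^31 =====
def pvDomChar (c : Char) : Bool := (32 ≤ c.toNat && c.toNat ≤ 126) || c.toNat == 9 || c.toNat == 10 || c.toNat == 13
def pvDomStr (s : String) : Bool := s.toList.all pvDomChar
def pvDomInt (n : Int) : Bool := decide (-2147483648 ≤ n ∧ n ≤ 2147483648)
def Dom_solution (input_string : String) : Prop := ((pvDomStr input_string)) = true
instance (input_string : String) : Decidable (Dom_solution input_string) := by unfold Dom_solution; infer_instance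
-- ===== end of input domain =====

-- B replaces A's single index-loop (count dict + s[i-1] lookback) by two explicit stages:
-- collapse the string into its run characters, then scan that list with a seen-set.
-- Equivalence of the return values is proved on the whole domain.

-- ===== PORT A =====
def solution (input_string : String) : String :=
  let cs := input_string.toList
  let fin := (PySem.List.pyRange 0 (cs.length : Int) 1).foldl
    (fun (st : PySem.Dict Char Int × PySem.Set Char) i =>
      let c := PySem.List.pyGetD cs i ' '
      let ans := if st.1.getD c 0 ≠ 0 then
          (if c ≠ PySem.List.pyGetD cs (i - 1) ' ' then PySem.Set.add st.2 c else st.2)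
        else st.2
      (st.1.modify c 0 (· + 1), ans))
    (PySem.Dict.empty, PySem.Set.empty)
  let answer := String.ofList (PySem.List.sorted fin.2 (fun x => x) false)
  if answer = "" then answer ++ "N" else answer

-- ===== PORT B =====
def solution_alt (input_string : String) : String :=
  -- pass 1: collapse into run characters (state = (runs, prev : Option Char))
  let runs := (input_string.toList.foldl
    (fun (st : List Char × Option Char) ch =>
      if some ch ≠ st.2 then (st.1 ++ [ch], some ch) else st) ([], none)).1
  -- pass 2: seen / repeated sets over the run list
  let fin := runs.foldl
    (fun (st : PySem.Set Char × PySem.Set Char) ch =>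
      if PySem.Set.contains st.1 ch then (st.1, PySem.Set.add st.2 ch)
      else (PySem.Set.add st.1 ch, st.2)) (PySem.Set.empty, PySem.Set.empty)
  let result := String.ofList (PySem.List.sorted fin.2 (fun x => x) false)
  if result = "" then "N" else result

-- ===== PRECONDITION & SPEC =====
def Spec_solution (input_string : String) (out : String) : Prop := out = solution_alt input_string
instance (input_string : String) (out : String) : Decidable (Spec_solution input_string out) := by unfold Spec_solution; infer_instance

-- ===== CLAIM (what is proved, stated in full; the proofs are below) =====
def Claim_equal_solution : Prop := ∀ (input_string : String), Dom_solution input_string → Spec_solution input_string (solution input_string)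

-- ===== LEMMAS AND PROOFS =====

/-- A's loop body, named for the proofs. -/
def stepA (cs : List Char) (st : PySem.Dict Char Int × PySem.Set Char) (i : Int) :
    PySem.Dict Char Int × PySem.Set Char :=
  let c := PySem.List.pyGetD cs i ' '
  let ans := if st.1.getD c 0 ≠ 0 then
      (if c ≠ PySem.List.pyGetD cs (i - 1) ' ' then PySem.Set.add st.2 c else st.2)
    else st.2
  (st.1.modify c 0 (· + 1), ans)

/-- B's second-loop body, named for the proofs. -/
def stepB (st : PySem.Set Char × PySem.Set Char) (ch : Char) :
    PySem.Set Char × PySem.Set Char :=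
  if PySem.Set.contains st.1 ch then (st.1, PySem.Set.add st.2 ch)
  else (PySem.Set.add st.1 ch, st.2)

/-- B's first-loop body, named for the proofs. -/
def stepR (st : List Char × Option Char) (ch : Char) : List Char × Option Char :=
  if some ch ≠ st.2 then (st.1 ++ [ch], some ch) else st

/-- Run characters of `p :: suf` after `p`. -/
def rcAux (p : Char) : List Char → List Char
  | [] => []
  | c :: rest => if c = p then rcAux c rest else c :: rcAux c rest

/-- A's loop rephrased structurally, carrying the previous character. -/
def procA (p : Char) : List Char → PySem.Dict Char Int × PySem.Set Char →
    PySem.Dict Char Int × PySem.Set Char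
  | [], st => st
  | c :: rest, st =>
    let ans := if st.1.getD c 0 ≠ 0 then
        (if c ≠ p then PySem.Set.add st.2 c else st.2)
      else st.2
    procA c rest (st.1.modify c 0 (· + 1), ans)

lemma runs_fold (rest : List Char) : ∀ (p : Char) (runs : List Char),
    (rest.foldl stepR (runs, some p)).1 = runs ++ rcAux p rest := by
  induction rest with
  | nil => intro p runs; simp [rcAux]
  | cons c rest ih =>
    intro p runs
    by_cases h : c = p
    · subst h; simp [List.foldl_cons, stepR, rcAux, ih]
    · simp only [List.foldl_cons, stepR, rcAux, if_neg h]
      rw [if_pos (by simp [h])]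
      simp [ih, List.append_assoc]

lemma foldA_suffix (suf : List Char) : ∀ (pre : List Char) (p : Char),
    pre.getLast? = some p → ∀ st,
    (PySem.List.pyRange (pre.length : Int) ((pre.length : Int) + (suf.length : Int)) 1).foldl
      (stepA (pre ++ suf)) st = procA p suf st := by
  induction suf with
  | nil => intro pre p _ st; simp [PySem.List.pyRange_one_eq_nil, procA]
  | cons c rest ih =>
    intro pre p hp st
    have hlt : (pre.length : Int) < (pre.length : Int) + ((c :: rest).length : Int) := by
      simp only [List.length_cons]; push_cast; omega
    rw [PySem.List.pyRange_one_cons hlt, List.foldl_cons]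
    -- the first step reads cs[pre.length] = c and cs[pre.length - 1] = p
    obtain ⟨pre', hpre⟩ : ∃ pre', pre = pre' ++ [p] := by
      rcases List.eq_nil_or_concat pre with h | ⟨l, a, h⟩
      · simp [h] at hp
      · refine ⟨l, ?_⟩; rw [h] at hp ⊢; simp at hp; simp [hp]
    have hget : PySem.List.pyGetD (pre ++ c :: rest) (pre.length : Int) ' ' = c := by
      simp [pysem]
    have hget' : PySem.List.pyGetD (pre ++ c :: rest) ((pre.length : Int) - 1) ' ' = p := by
      subst hpre
      have : ((pre' ++ [p]).length : Int) - 1 = (pre'.length : Int) := by simp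
      rw [this]
      have : (pre' ++ [p]) ++ c :: rest = pre' ++ p :: (c :: rest) := by simp
      rw [this]; simp [pysem]
    have hstep : stepA (pre ++ c :: rest) st (pre.length : Int) =
        (st.1.modify c 0 (· + 1),
         if st.1.getD c 0 ≠ 0 then
           (if c ≠ p then PySem.Set.add st.2 c else st.2) else st.2) := by
      simp only [stepA, hget, hget']
    rw [hstep]
    have hcs : pre ++ c :: rest = (pre ++ [c]) ++ rest := by simp
    have hrng : PySem.List.pyRange ((pre.length : Int) + 1)
        ((pre.length : Int) + ((c :: rest).length : Int)) 1 =
        PySem.List.pyRange (((pre ++ [c]).length : Int))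
        (((pre ++ [c]).length : Int) + (rest.length : Int)) 1 := by
      congr 1 <;> simp
      omega
    rw [hrng, hcs, ih (pre ++ [c]) c (List.getLast?_concat ..)]
    rfl

lemma invariant_lemma (suf : List Char) : ∀ (p : Char) (alpha : PySem.Dict Char Int)
    (ans seen : PySem.Set Char),
    (∀ x, 0 ≤ alpha.getD x 0) →
    (∀ x, alpha.getD x 0 ≠ 0 ↔ x ∈ seen) →
    p ∈ seen →
    (procA p suf (alpha, ans)).2 = ((rcAux p suf).foldl stepB (seen, ans)).2 := by
  induction suf with
  | nil => intro p alpha ans seen _ _ _; simp [procA, rcAux]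
  | cons c rest ih =>
    intro p alpha ans seen h0 h1 hp
    have h0' : ∀ x, 0 ≤ (alpha.modify c 0 (· + 1)).getD x 0 := by
      intro x; rw [PySem.Dict.getD_modify]
      split
      · have := h0 c; omega
      · exact h0 x
    have h1' : ∀ x, (alpha.modify c 0 (· + 1)).getD x 0 ≠ 0 ↔ x ∈ PySem.Set.add seen c := by
      intro x; rw [PySem.Dict.getD_modify, PySem.Set.mem_add]
      split
      · rename_i hx
        constructor
        · intro _; exact Or.inr hx
        · intro _; have := h0 c; omega
      · rename_i hx
        rw [h1 x]
        constructor
        · exact Or.inl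
        · rintro (h | h)
          · exact h
          · exact (hx h).elim
    by_cases hcp : c = p
    · subst hcp
      have hnz : alpha.getD c 0 ≠ 0 := (h1 c).mpr hp
      have hadd : PySem.Set.add seen c = seen := PySem.Set.add_of_mem hp
      rw [hadd] at h1'
      have e1 : rcAux c (c :: rest) = rcAux c rest := by rw [rcAux, if_pos rfl]
      have e2 : procA c (c :: rest) (alpha, ans) =
          procA c rest (alpha.modify c 0 (· + 1), ans) := by
        simp [procA, hnz]
      rw [e1, e2, ih c _ ans seen h0' h1' hp]
    · have e1 : rcAux p (c :: rest) = c :: rcAux c rest := by rw [rcAux, if_neg hcp]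
      rw [e1, List.foldl_cons]
      by_cases hc : c ∈ seen
      · have hnz : alpha.getD c 0 ≠ 0 := (h1 c).mpr hc
        have hadd : PySem.Set.add seen c = seen := PySem.Set.add_of_mem hc
        rw [hadd] at h1'
        have hB : stepB (seen, ans) c = (seen, PySem.Set.add ans c) := by
          simp [stepB, PySem.Set.contains, hc]
        have e2 : procA p (c :: rest) (alpha, ans) =
            procA c rest (alpha.modify c 0 (· + 1), PySem.Set.add ans c) := by
          simp [procA, hnz, hcp]
        rw [hB, e2]
        exact ih c _ _ seen h0' h1' hc
      · have hz : alpha.getD c 0 = 0 := by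
          by_contra h; exact hc ((h1 c).mp h)
        have hB : stepB (seen, ans) c = (PySem.Set.add seen c, ans) := by
          simp [stepB, PySem.Set.contains, hc]
        have e2 : procA p (c :: rest) (alpha, ans) =
            procA c rest (alpha.modify c 0 (· + 1), ans) := by
          simp [procA, hz]
        rw [hB, e2]
        exact ih c _ _ _ h0' h1' (by rw [PySem.Set.mem_add]; exact Or.inr rfl)

lemma final_sets_eq (cs : List Char) :
    ((PySem.List.pyRange 0 (cs.length : Int) 1).foldl (stepA cs)
      (PySem.Dict.empty, PySem.Set.empty)).2 =
    ((cs.foldl stepR ([], none)).1.foldl stepB (PySem.Set.empty, PySem.Set.empty)).2 := by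
  cases cs with
  | nil => simp [PySem.List.pyRange_one_eq_nil]
  | cons c rest =>
    -- first iteration of each loop
    have hr : ((c :: rest).foldl stepR ([], none)).1 = c :: rcAux c rest := by
      rw [List.foldl_cons]
      have : stepR ([], none) c = ([c], some c) := by simp [stepR]
      rw [this, runs_fold]; rfl
    rw [hr, List.foldl_cons]
    have hB1 : stepB (PySem.Set.empty, PySem.Set.empty) c =
        (PySem.Set.add PySem.Set.empty c, PySem.Set.empty) := by
      simp [stepB, PySem.Set.contains, PySem.Set.empty]
    rw [hB1]
    have hlt : (0 : Int) < ((c :: rest).length : Int) := by simp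
    rw [PySem.List.pyRange_one_cons hlt, List.foldl_cons]
    have hA1 : stepA (c :: rest) (PySem.Dict.empty, PySem.Set.empty) 0 =
        (PySem.Dict.empty.modify c 0 (· + 1), PySem.Set.empty) := by
      simp [stepA, pysem]
    rw [hA1]
    have hrng : PySem.List.pyRange (0 + 1) ((c :: rest).length : Int) 1 =
        PySem.List.pyRange (([c] : List Char).length : Int)
          ((([c] : List Char).length : Int) + (rest.length : Int)) 1 := by
      congr 1 <;> simp
      omega
    rw [hrng]
    have := foldA_suffix rest [c] c (by simp) (PySem.Dict.empty.modify c 0 (· + 1), PySem.Set.empty)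
    rw [show ([c] : List Char) ++ rest = c :: rest from rfl] at this
    rw [this]
    apply invariant_lemma
    · intro x; rw [PySem.Dict.getD_modify]; split <;> simp [pysem]
    · intro x; rw [PySem.Dict.getD_modify, PySem.Set.mem_add]
      split
      · rename_i hx; simp [pysem, hx]
      · rename_i hx; simp [pysem, PySem.Set.empty]; omega
    · rw [PySem.Set.mem_add]; exact Or.inr rfl

-- ===== VERDICT (by name: the statement is the Claim_ definition above) =====
theorem solution_spec : Claim_equal_solution := by
  intro s _
  show solution s = solution_alt s
  have hA : solution s =
      (let l := PySem.List.sorted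
        (((PySem.List.pyRange 0 (s.toList.length : Int) 1).foldl (stepA s.toList)
          (PySem.Dict.empty, PySem.Set.empty)).2) (fun x => x) false
       let answer := String.ofList l
       if answer = "" then answer ++ "N" else answer) := rfl
  have hB : solution_alt s =
      (let l := PySem.List.sorted
        ((((s.toList.foldl stepR ([], none)).1).foldl stepB
          (PySem.Set.empty, PySem.Set.empty)).2) (fun x => x) false
       let result := String.ofList l
       if result = "" then "N" else result) := rfl
  rw [hA, hB, final_sets_eq s.toList]
  dsimp only
  split
  · rename_i hemp; rw [hemp]; simp
  · rfl
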